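-- pv_equiv track=rewrite | github.com/blokkies48/100-days-of-code | Hyperion_100_days/spicy_sorting.py | spicy_sorting
-- ===== SOURCE A (Python) =====
-- def spicy_sorting(arr):
--     return_arr1 = []
--     return_arr2 = []
--     for item in arr:
--         if item < 0:
--             return_arr1.append(item)
--         else:
--             return_arr2.append(item)
--
--     return return_arr2 + return_arr1
-- ===== SOURCE B (Python) =====
-- def spicy_sorting(arr):
--     return sorted(arr, key=lambda x: x < 0)
-- ===== Notes on version B (the rewrite author's own statement) =====
-- stated objective: idiomatic
-- what changed: Replaced the two-bucket partition loop with a single stable sort keyed on the boolean predicate x < 0, so non-negatives precede negatives with original relative order preserved.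
import Mathlib
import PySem

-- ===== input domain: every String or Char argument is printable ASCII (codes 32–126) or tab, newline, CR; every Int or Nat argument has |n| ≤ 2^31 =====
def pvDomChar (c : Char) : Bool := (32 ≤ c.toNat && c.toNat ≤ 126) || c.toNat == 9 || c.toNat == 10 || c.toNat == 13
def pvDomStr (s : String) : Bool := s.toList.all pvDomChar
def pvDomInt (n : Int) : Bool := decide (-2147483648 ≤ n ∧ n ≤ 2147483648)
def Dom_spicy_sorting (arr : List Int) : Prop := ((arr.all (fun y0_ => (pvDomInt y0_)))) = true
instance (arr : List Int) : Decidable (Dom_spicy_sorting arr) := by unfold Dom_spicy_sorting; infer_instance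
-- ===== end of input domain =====

-- B replaces A's two-bucket partition loop by one stable sort keyed on the predicate x < 0 (idiomatic, same result).


-- ===== PORT A =====
-- literal port: one loop appending each item to return_arr1 (negatives) or return_arr2 (others), then return_arr2 ++ return_arr1
def spicy_sorting (arr : List Int) : List Int :=
  let p := arr.foldl
    (fun (acc : List Int × List Int) item =>
      if item < 0 then (acc.1 ++ [item], acc.2) else (acc.1, acc.2 ++ [item]))
    ([], [])
  p.2 ++ p.1

-- ===== PORT B =====
-- literal port of Source B: sorted(arr, key=lambda x: x < 0) — Python's stable sort with a Bool key (False < True)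
def spicy_sorting_alt (arr : List Int) : List Int :=
  PySem.List.sorted arr (fun x => decide (x < 0)) false

-- ===== PRECONDITION & SPEC =====
def Spec_spicy_sorting (arr : List Int) (out : List Int) : Prop := out = spicy_sorting_alt arr
instance (arr : List Int) (out : List Int) : Decidable (Spec_spicy_sorting arr out) := by unfold Spec_spicy_sorting; infer_instance

-- ===== CLAIM (what is proved, stated in full; the proofs are below) =====
def Claim_equal_spicy_sorting : Prop := ∀ (arr : List Int), Dom_spicy_sorting arr → Spec_spicy_sorting arr (spicy_sorting arr)

-- ===== LEMMAS AND PROOFS =====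

-- inserting a non-negative element skips a prefix of non-negatives
theorem insertBy_nonneg_split (x : Int) (hx : ¬ x < 0) (P N : List Int)
    (hP : ∀ y ∈ P, ¬ y < 0) (hN : ∀ y ∈ N, y < 0) :
    PySem.List.insertBy (fun a b => decide ((decide (a < 0) : Bool) < (decide (b < 0) : Bool))) x (P ++ N)
      = (P ++ [x]) ++ N := by
  induction P with
  | nil =>
    cases N with
    | nil => simp [PySem.List.insertBy]
    | cons n ns =>
      have hn := hN n (by simp)
      simp [PySem.List.insertBy, hx, hn, Bool.lt_iff]
  | cons p ps ih =>
    have hp := hP p (by simp)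
    simp only [List.cons_append]
    simp [PySem.List.insertBy, hx, hp]
    rw [ih (fun y hy => hP y (by simp [hy]))]
    simp

-- inserting a negative element goes to the very end of P ++ N
theorem insertBy_neg_end (x : Int) (hx : x < 0) (L : List Int) :
    PySem.List.insertBy (fun a b => decide ((decide (a < 0) : Bool) < (decide (b < 0) : Bool))) x L
      = L ++ [x] := by
  apply PySem.List.insertBy_of_forall_not_before
  intro y _
  simp [hx, Bool.lt_iff]

-- loop invariant: folding insertBy over xs starting from P ++ N (P non-negatives, N negatives)
theorem sorted_key_invariant (xs P N : List Int)
    (hP : ∀ y ∈ P, ¬ y < 0) (hN : ∀ y ∈ N, y < 0) :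
    xs.foldl (fun acc x => PySem.List.insertBy
        (fun a b => decide ((decide (a < 0) : Bool) < (decide (b < 0) : Bool))) x acc) (P ++ N)
      = (P ++ xs.filter (fun x => !decide (x < 0))) ++ (N ++ xs.filter (fun x => decide (x < 0))) := by
  induction xs generalizing P N with
  | nil => simp
  | cons x t ih =>
    by_cases hx : x < 0
    · have step : PySem.List.insertBy
          (fun a b => decide ((decide (a < 0) : Bool) < (decide (b < 0) : Bool))) x (P ++ N)
          = P ++ (N ++ [x]) := by
        rw [insertBy_neg_end x hx (P ++ N)]; simp
      simp only [List.foldl_cons, step]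
      rw [ih P (N ++ [x]) hP (by intro y hy; rcases List.mem_append.mp hy with h | h
                                 · exact hN y h
                                 · simp at h; omega)]
      simp [hx]
    · have step : PySem.List.insertBy
          (fun a b => decide ((decide (a < 0) : Bool) < (decide (b < 0) : Bool))) x (P ++ N)
          = (P ++ [x]) ++ N := insertBy_nonneg_split x hx P N hP hN
      simp only [List.foldl_cons, step]
      rw [ih (P ++ [x]) N (by intro y hy; rcases List.mem_append.mp hy with h | h
                              · exact hP y h
                              · simp at h; omega) hN]
      simp [hx]

-- A's loop invariant: the pair accumulator collects negatives / non-negatives in order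
theorem partition_invariant (xs : List Int) (r1 r2 : List Int) :
    xs.foldl
      (fun (acc : List Int × List Int) item =>
        if item < 0 then (acc.1 ++ [item], acc.2) else (acc.1, acc.2 ++ [item]))
      (r1, r2)
      = (r1 ++ xs.filter (fun x => decide (x < 0)), r2 ++ xs.filter (fun x => !decide (x < 0))) := by
  induction xs generalizing r1 r2 with
  | nil => simp
  | cons x t ih =>
    by_cases hx : x < 0 <;> simp [List.foldl_cons, hx, ih]

-- ===== VERDICT (by name: the statement is the Claim_ definition above) =====
theorem spicy_sorting_spec : Claim_equal_spicy_sorting := by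
  intro arr _
  unfold Spec_spicy_sorting spicy_sorting spicy_sorting_alt
  rw [PySem.List.sorted_eq_foldl_insertBy]
  have hB := sorted_key_invariant arr [] [] (by simp) (by simp)
  simp only [List.nil_append] at hB
  rw [hB, partition_invariant]
  simp
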